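-- pv_equiv track=rewrite | github.com/Gioppyy/unipr_exercises | 2025/esercitazioni/24-11/9_7.py | all_below
-- ===== SOURCE A (Python) =====
-- def all_below(nums: list, limit: int):
--     if len(nums) == 0:
--         return True
--
--     head = nums[0]
--     tail = nums[1::]
--     if head > limit:
--         return False
--
--     return all_below(tail, limit)
-- ===== SOURCE B (Python) =====
-- def all_below(nums: list, limit: int):
--     return max(nums, default=limit) <= limit
-- ===== Notes on version B (the rewrite author's own statement) =====
-- stated objective: idiomatic
-- what changed: Replaces the head/tail slicing recursion with a single built-in max(nums, default=limit) <= limit comparison.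
import Mathlib
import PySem

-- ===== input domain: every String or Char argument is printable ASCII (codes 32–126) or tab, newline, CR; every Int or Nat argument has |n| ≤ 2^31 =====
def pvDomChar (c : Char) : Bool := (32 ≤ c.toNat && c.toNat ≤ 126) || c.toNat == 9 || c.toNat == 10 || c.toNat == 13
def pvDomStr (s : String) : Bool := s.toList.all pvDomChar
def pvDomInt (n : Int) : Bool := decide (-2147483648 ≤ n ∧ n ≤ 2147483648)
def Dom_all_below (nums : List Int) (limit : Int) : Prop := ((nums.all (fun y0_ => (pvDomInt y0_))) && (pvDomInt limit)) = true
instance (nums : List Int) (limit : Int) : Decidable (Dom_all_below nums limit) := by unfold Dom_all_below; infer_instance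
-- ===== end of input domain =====

-- B replaces A's head/tail slicing recursion with one pass: max(nums, default=limit) <= limit.


-- ===== PORT A =====
def all_below (nums : List Int) (limit : Int) : Bool :=
  match nums with
  | [] => true
  | head :: rest =>
    let tail := PySem.List.slice (head :: rest) (some 1) none   -- nums[1::]
    if head > limit then false else all_below tail limit
decreasing_by simp [PySem.List.slice_from_one]

-- ===== PORT B =====
def all_below_alt (nums : List Int) (limit : Int) : Bool :=
  decide (PySem.List.maxD nums (fun y => y) limit ≤ limit)   -- max(nums, default=limit) <= limit

-- ===== PRECONDITION & SPEC =====
def Spec_all_below (nums : List Int) (limit : Int) (out : Bool) : Prop := out = all_below_alt nums limit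
instance (nums : List Int) (limit : Int) (out : Bool) : Decidable (Spec_all_below nums limit out) := by unfold Spec_all_below; infer_instance

-- ===== CLAIM (what is proved, stated in full; the proofs are below) =====
def Claim_equal_all_below : Prop := ∀ (nums : List Int) (limit : Int), Dom_all_below nums limit → Spec_all_below nums limit (all_below nums limit)

-- ===== LEMMAS AND PROOFS =====

lemma all_below_cons_foldl (t : List Int) (x limit : Int) :
    all_below (x :: t) limit = decide (t.foldl max x ≤ limit) := by
  induction t generalizing x with
  | nil =>
    simp only [all_below, PySem.List.slice_from_one, List.tail_cons, List.foldl_nil]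
    by_cases h : x ≤ limit
    · simp [not_lt.mpr h, h]
    · simp [not_le.mp h, h]
  | cons y t' ih =>
    rw [all_below]
    simp only [PySem.List.slice_from_one, List.tail_cons, ih y, List.foldl_cons]
    have hassoc : List.foldl max (max x y) t' = max x (List.foldl max y t') :=
      List.foldl_assoc
    simp only [hassoc]
    by_cases h : x ≤ limit
    · simp [not_lt.mpr h, max_le_iff, h]
    · have h' : x > limit := not_le.mp h
      simp [h', max_le_iff, h]

-- ===== VERDICT (by name: the statement is the Claim_ definition above) =====
theorem all_below_spec : Claim_equal_all_below := by
  intro nums limit _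
  unfold Spec_all_below all_below_alt
  cases nums with
  | nil => simp [all_below, PySem.List.maxD, PySem.List.max?]
  | cons x t =>
    rw [all_below_cons_foldl]
    simp [PySem.List.maxD, PySem.List.max?_id_cons]
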